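-- pv_equiv track=rewrite | github.com/enzogennarii/trybe-exercicios | ciencia-da-computacao/secao-04-estruturas-de-dados-2-hashmaps-e-sets/dia-01-hashmap-e-dict/exercicios/qual_e_a_fila.py | get_order_using_dict
-- ===== SOURCE A (Python) =====
-- def get_order_using_dict(orders):
--     order_map = {person[0]: person[1] for person in orders}
--     inverted_order_map = {person[1]: person[0] for person in orders}
--     person_in_front = ""
--
--     for person in order_map:
--         if person not in inverted_order_map:
--             person_in_front = person
--
--     ordered = [person_in_front]
--     while person_in_front in order_map:
--         ordered.append(order_map[person_in_front])
--         person_in_front = order_map[person_in_front]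
--
--     return ordered
-- ===== SOURCE B (Python) =====
-- def get_order_using_dict(orders):
--     successor = dict(orders)
--     followers = {s for _, s in orders}
--     # stitch the pairs into maximal chains, keyed by their first member
--     chains = {}
--     for a, b in successor.items():
--         head = next((h for h, chain in chains.items() if chain[-1] == a), a)
--         chains[head] = chains.get(head, [a]) + chains.pop(b, [b])
--     front = ""
--     for person in successor:
--         if person not in followers:
--             front = person
--     return chains.get(front, [front])
-- ===== Notes on version B (the rewrite author's own statement) =====
-- stated objective: alternative
-- what changed: B never walks the chain pointer-by-pointer: it stitches the dict's pairs into maximal chains in a single pass (merging the fragment ending at a pair's first member with the fragment starting at its second) and returns the chain that starts at the front person; Pre_ excludes inputs whose kept successors collide and the no-front-with-""-as-predecessor corner, where A's walk can diverge or its returned value is an accident of the "" sentinel and the garbled overwritten map.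
-- outside the precondition, e.g. on get_order_using_dict([('c', 'b'), ('b', 'd'), ('e', 'b')]): A returns ['e', 'b', 'd'], B returns ['e', 'b']; on get_order_using_dict([('', 'y'), ('', 'q'), ('y', '')]): A returns ['', 'q'], B returns ['']
import Mathlib
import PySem

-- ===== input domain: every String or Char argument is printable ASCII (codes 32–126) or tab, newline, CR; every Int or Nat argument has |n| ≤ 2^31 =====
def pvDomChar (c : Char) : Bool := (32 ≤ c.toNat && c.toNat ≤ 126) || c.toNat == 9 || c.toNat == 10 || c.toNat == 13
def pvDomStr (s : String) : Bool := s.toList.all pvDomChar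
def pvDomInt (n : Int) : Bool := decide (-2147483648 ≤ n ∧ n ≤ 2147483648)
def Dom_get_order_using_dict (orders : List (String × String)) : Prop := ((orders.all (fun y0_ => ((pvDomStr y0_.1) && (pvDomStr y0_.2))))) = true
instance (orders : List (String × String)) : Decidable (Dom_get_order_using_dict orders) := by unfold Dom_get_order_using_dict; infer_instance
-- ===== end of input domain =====

-- B reconstructs the queue without walking it pointer-by-pointer: it stitches the dict's
-- pairs into maximal chains in one pass (merging fragments) and returns the chain that
-- starts at the front person — a different algorithm of similar cost (objective: alternative).


-- ===== PORT A =====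
-- the 'while person_in_front in order_map' loop; fuel orders.length + 1 suffices whenever the Python loop terminates
def pvWhileA (m : PySem.Dict String String) : Nat → String → List String → List String
  | 0, _, acc => acc
  | n+1, cur, acc =>
    match m.get? cur with
    | some nxt => pvWhileA m n nxt (acc ++ [nxt])
    | none => acc

def get_order_using_dict (orders : List (String × String)) : List String :=
  let order_map : PySem.Dict String String :=
    orders.foldl (fun d person => d.insert person.1 person.2) PySem.Dict.empty
  let inverted_order_map : PySem.Dict String String :=
    orders.foldl (fun d person => d.insert person.2 person.1) PySem.Dict.empty
  let person_in_front :=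
    order_map.keys.foldl (fun acc person => if !(inverted_order_map.contains person) then person else acc) ""
  pvWhileA order_map (orders.length + 1) person_in_front [person_in_front]

-- ===== PORT B =====
-- body of B's stitching loop: chains[head] = chains.get(head, [a]) + chains.pop(b, [b])
def pvStitchStep (chains : PySem.Dict String (List String)) (ab : String × String) :
    PySem.Dict String (List String) :=
  let head := ((chains.items.find? (fun hc => PySem.List.pyGet? hc.2 (-1) == some ab.1)).map
    (fun hc => hc.1)).getD ab.1
  let left := chains.getD head [ab.1]
  match chains.pop? ab.2 with
  | some (v, rest) => rest.insert head (left ++ v)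
  | none => chains.insert head (left ++ [ab.2])

def get_order_using_dict_alt (orders : List (String × String)) : List String :=
  let successor : PySem.Dict String String :=
    orders.foldl (fun d p => d.insert p.1 p.2) PySem.Dict.empty
  let followers : PySem.Set String :=
    orders.foldl (fun s p => PySem.Set.add s p.2) PySem.Set.empty
  let chains : PySem.Dict String (List String) :=
    successor.items.foldl pvStitchStep PySem.Dict.empty
  let front :=
    successor.keys.foldl (fun acc person => if !(followers.contains person) then person else acc) ""
  (chains.get? front).getD [front]

-- ===== PRECONDITION & SPEC =====
-- the successors actually kept in the queue map: for each distinct predecessor (in first-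
-- occurrence order) the successor of its LAST pair, mirroring Python's dict overwrite
def pvEffSeconds (orders : List (String × String)) : List String :=
  (PySem.List.dedup (orders.map Prod.fst)).map
    (fun k => ((orders.reverse.find? (fun p => p.1 == k)).map Prod.snd).getD "")

-- Pre_ excludes inputs whose kept successors collide (the queue map is garbled: A's walk can
-- diverge on a cycle or return a merged chain) and inputs where no person is without a
-- predecessor while "" itself occurs as a predecessor (A then walks from its "" sentinel,
-- possibly forever); on such inputs A's returned values are accidents of its implementation.
-- See claim.json "cites" for excluded inputs on which A still returns.
def Pre_get_order_using_dict (orders : List (String × String)) : Prop :=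
  (pvEffSeconds orders).Nodup ∧
  ("" ∉ orders.map Prod.fst ∨ ∃ p ∈ orders.map Prod.fst, p ∉ orders.map Prod.snd)
instance (orders : List (String × String)) : Decidable (Pre_get_order_using_dict orders) := by
  unfold Pre_get_order_using_dict; infer_instance

def pvWitness_get_order_using_dict : (List (String × String)) := [("a", "b"), ("b", "c")]

def Spec_get_order_using_dict (orders : List (String × String)) (out : List String) : Prop := out = get_order_using_dict_alt orders
instance (orders : List (String × String)) (out : List String) : Decidable (Spec_get_order_using_dict orders out) := by unfold Spec_get_order_using_dict; infer_instance

-- ===== CLAIM (what is proved, stated in full; the proofs are below) =====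
def Claim_equal_get_order_using_dict : Prop := ∀ (orders : List (String × String)), Dom_get_order_using_dict orders → Pre_get_order_using_dict orders → Spec_get_order_using_dict orders (get_order_using_dict orders)

-- ===== LEMMAS AND PROOFS =====

-- abstract walk: the visited-node list of A's while loop, fuel-bounded
def pvWalk (h : String → Option String) : Nat → String → List String
  | 0, c => [c]
  | n+1, c => match h c with | none => [c] | some d => c :: pvWalk h n d

-- k-fold iterate of the partial successor function
def pvIter (h : String → Option String) : Nat → String → Option String
  | 0, c => some c
  | k+1, c => match h c with | none => none | some d => pvIter h k d

-- first-match association lookup (both directions of the pair list)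
def pvAssoc (key val : String × String → String) (E : List (String × String)) (x : String) :
    Option String :=
  (E.find? (fun p => key p == x)).map val

-- a maximal chain of f starting at h: linked, and its last node has no successor
def PvChain (f : String → Option String) (h : String) (L : List String) : Prop :=
  L.head? = some h ∧ List.IsChain (fun x y => f x = some y) L ∧
  (∃ t, L.getLast? = some t ∧ f t = none)

-- loop invariant of B's stitching fold over the processed prefix E of the dict items:
-- keys are unique; every entry is keyed by a processed predecessor and is either a maximal
-- chain of the prefix graph from a head (a key with no predecessor yet) or a leftover
-- closed-cycle entry whose last element is a processed predecessor; every head has an entry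
def PvInv (E : List (String × String)) (C : PySem.Dict String (List String)) : Prop :=
  C.keys.Nodup ∧
  (∀ h L, C.get? h = some L →
    h ∈ E.map Prod.fst ∧
    (h ∉ E.map Prod.snd →
      PvChain (pvAssoc Prod.fst Prod.snd E) h L ∧
      ∃ z, L.getLast? = some z ∧ z ∈ E.map Prod.snd) ∧
    (h ∈ E.map Prod.snd → ∃ z, L.getLast? = some z ∧ z ∈ E.map Prod.fst)) ∧
  (∀ h, h ∈ E.map Prod.fst → h ∉ E.map Prod.snd → ∃ L, C.get? h = some L)

-- ---------- walk lemmas (A's loop) ----------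

theorem pvWalk_ne_nil (h : String → Option String) (n : Nat) (c : String) : pvWalk h n c ≠ [] := by
  cases n with
  | zero => simp [pvWalk]
  | succ k => cases hc : h c <;> simp [pvWalk, hc]

theorem pvWalk_head (h : String → Option String) (n : Nat) (c : String) :
    pvWalk h n c = c :: (pvWalk h n c).tail := by
  cases n with
  | zero => simp [pvWalk]
  | succ k => cases hc : h c <;> simp [pvWalk, hc]

theorem pvWhileA_eq_walk (m : PySem.Dict String String) :
    ∀ (n : Nat) (cur : String) (acc : List String),
      pvWhileA m n cur acc = acc ++ (pvWalk m.get? n cur).tail := by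
  intro n
  induction n with
  | zero => intro cur acc; simp [pvWhileA, pvWalk]
  | succ k ih =>
    intro cur acc
    cases hc : m.get? cur with
    | none => simp [pvWhileA, pvWalk, hc]
    | some nxt =>
      simp only [pvWhileA, pvWalk, hc, ih, List.tail_cons]
      rw [List.append_assoc]
      congr 1
      rw [List.singleton_append]
      exact (pvWalk_head m.get? k nxt).symm

theorem mem_pvWalk (h : String → Option String) :
    ∀ (n : Nat) (c x : String), x ∈ pvWalk h n c → x = c ∨ ∃ y, h y = some x := by
  intro n
  induction n with
  | zero => intro c x hx; simp [pvWalk] at hx; exact Or.inl hx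
  | succ k ih =>
    intro c x hx
    cases hc : h c with
    | none => simp [pvWalk, hc] at hx; exact Or.inl hx
    | some d =>
      simp only [pvWalk, hc, List.mem_cons] at hx
      rcases hx with hx | hx
      · exact Or.inl hx
      · rcases ih d x hx with rfl | hy
        · exact Or.inr ⟨c, hc⟩
        · exact Or.inr hy

theorem pvWalk_getElem (h : String → Option String) :
    ∀ (n : Nat) (c : String) (k : Nat) (hk : k < (pvWalk h n c).length),
      pvIter h k c = some ((pvWalk h n c)[k]) := by
  intro n
  induction n with
  | zero =>
    intro c k hk
    simp [pvWalk] at hk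
    subst hk; simp [pvWalk, pvIter]
  | succ m ih =>
    intro c k hk
    cases hc : h c with
    | none =>
      simp [pvWalk, hc] at hk
      subst hk; simp [pvWalk, pvIter, hc]
    | some d =>
      cases k with
      | zero => simp [pvWalk, pvIter, hc]
      | succ j =>
        simp only [pvWalk, hc, List.length_cons] at hk ⊢
        simp only [pvIter, hc, List.getElem_cons_succ]
        exact ih d j (by omega)

-- peel the LAST step off an iterate
theorem pvIter_last (h : String → Option String) :
    ∀ (k : Nat) (c x : String), pvIter h (k+1) c = some x →
      ∃ y, pvIter h k c = some y ∧ h y = some x := by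
  intro k
  induction k with
  | zero =>
    intro c x hx
    cases hc : h c with
    | none => simp [pvIter, hc] at hx
    | some d => simp [pvIter, hc] at hx; exact ⟨c, by simp [pvIter], by rw [hc, hx]⟩
  | succ j ih =>
    intro c x hx
    cases hc : h c with
    | none => simp [pvIter, hc] at hx
    | some d =>
      simp only [pvIter, hc] at hx
      rcases ih d x hx with ⟨y, hy1, hy2⟩
      exact ⟨y, by simp [pvIter, hc, hy1], hy2⟩

-- under injectivity and 's not in the image', the iterates from s are pairwise distinct
theorem pvIter_inj (h : String → Option String) (s : String)
    (hinj : ∀ a b z, h a = some z → h b = some z → a = b)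
    (hs : ∀ y, h y ≠ some s) :
    ∀ (j i : Nat) (x : String), i ≤ j → pvIter h i s = some x → pvIter h j s = some x → i = j := by
  intro j
  induction j with
  | zero => intro i x hij _ _; omega
  | succ j' ih =>
    intro i x hij hi hj
    rcases pvIter_last h j' s x hj with ⟨y, hy1, hy2⟩
    cases i with
    | zero =>
      simp [pvIter] at hi
      subst hi
      exact absurd hy2 (hs y)
    | succ i' =>
      rcases pvIter_last h i' s x hi with ⟨y', hy1', hy2'⟩
      have hyy : y' = y := hinj y' y x hy2' hy2
      rw [hyy] at hy1'
      have := ih i' y (by omega) hy1' hy1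
      omega

theorem pvWalk_nodup (h : String → Option String) (s : String) (n : Nat)
    (hinj : ∀ a b z, h a = some z → h b = some z → a = b)
    (hs : ∀ y, h y ≠ some s) : (pvWalk h n s).Nodup := by
  rw [List.nodup_iff_injective_get]
  intro ⟨i, hi⟩ ⟨j, hj⟩ hij
  simp only [List.get_eq_getElem] at hij
  have h1 := pvWalk_getElem h n s i hi
  have h2 := pvWalk_getElem h n s j hj
  rw [hij] at h1
  rcases Nat.le_total i j with hle | hle
  · exact Fin.ext (pvIter_inj h s hinj hs j i _ hle h1 h2)
  · exact Fin.ext (pvIter_inj h s hinj hs i j _ hle h2 h1).symm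

-- either the walk ended properly (no successor at its last node) or it used all its fuel
theorem pvWalk_proper_or (h : String → Option String) :
    ∀ (n : Nat) (c : String),
      h ((pvWalk h n c).getLast (pvWalk_ne_nil h n c)) = none ∨ (pvWalk h n c).length = n + 1 := by
  intro n
  induction n with
  | zero => intro c; right; simp [pvWalk]
  | succ k ih =>
    intro c
    cases hc : h c with
    | none => left; simp [pvWalk, hc]
    | some d =>
      rcases ih d with hp | hl
      · left
        have hgl : (pvWalk h (k+1) c).getLast (pvWalk_ne_nil h (k+1) c)
            = (pvWalk h k d).getLast (pvWalk_ne_nil h k d) := by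
          simp only [pvWalk, hc]
          exact List.getLast_cons (pvWalk_ne_nil h k d)
        rw [hgl]; exact hp
      · right; simp [pvWalk, hc, hl]

-- pvWalk from a node with no successor is a singleton
theorem pvWalk_of_none (h : String → Option String) (m : Nat) (c : String) (hc : h c = none) :
    pvWalk h m c = [c] := by
  cases m with
  | zero => rfl
  | succ k => simp [pvWalk, hc]

-- pigeonhole: with injectivity, a start outside the image and an image inside S, fuel
-- S.length + 1 is enough for the walk to end at a node with no successor
theorem pvWalk_proper_of (h : String → Option String) (c : String) (S : List String) (fuel : Nat)
    (hrange : ∀ x y, h y = some x → x ∈ S)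
    (hinj : ∀ a b z, h a = some z → h b = some z → a = b)
    (hnos : ∀ y, h y ≠ some c)
    (hfuel : S.length + 1 ≤ fuel) :
    h ((pvWalk h fuel c).getLast (pvWalk_ne_nil h fuel c)) = none := by
  rcases pvWalk_proper_or h fuel c with hp | hl
  · exact hp
  · exfalso
    have hnd : (pvWalk h fuel c).Nodup := pvWalk_nodup h c fuel hinj hnos
    have hsub : ∀ x ∈ pvWalk h fuel c, x ∈ c :: S := by
      intro x hx
      rcases mem_pvWalk h fuel c x hx with rfl | ⟨y, hy⟩
      · exact List.mem_cons_self
      · exact List.mem_cons_of_mem _ (hrange x y hy)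
    have h1 : (pvWalk h fuel c).toFinset.card = (pvWalk h fuel c).length :=
      List.toFinset_card_of_nodup hnd
    have h2 : (pvWalk h fuel c).toFinset ⊆ (c :: S).toFinset := by
      intro x hx
      exact List.mem_toFinset.mpr (hsub x (List.mem_toFinset.mp hx))
    have h3 : (pvWalk h fuel c).toFinset.card ≤ (c :: S).toFinset.card := Finset.card_le_card h2
    have h4 : (c :: S).toFinset.card ≤ (c :: S).length := List.toFinset_card_le _
    simp only [List.length_cons] at h4
    omega

-- ---------- association-lookup lemmas ----------

theorem pvAssoc_mem (key val : String × String → String) (E : List (String × String))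
    (x y : String) (hx : pvAssoc key val E x = some y) :
    ∃ p ∈ E, key p = x ∧ val p = y := by
  unfold pvAssoc at hx
  cases hf : E.find? (fun p => key p == x) with
  | none => rw [hf] at hx; cases hx
  | some q =>
    rw [hf] at hx
    have hq : q ∈ E := List.mem_of_find?_eq_some hf
    have hqx : key q = x := by simpa using List.find?_some hf
    exact ⟨q, hq, hqx, by simpa using hx⟩

theorem pvAssoc_none (key val : String × String → String) (E : List (String × String))
    (x : String) : pvAssoc key val E x = none ↔ x ∉ E.map key := by
  unfold pvAssoc
  cases hf : E.find? (fun p => key p == x) with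
  | none =>
    simp only [Option.map_none, true_iff]
    intro hx
    rcases List.mem_map.mp hx with ⟨p, hp, hpx⟩
    have := List.find?_eq_none.mp hf p hp
    simp [hpx] at this
  | some q =>
    simp only [Option.map_some, reduceCtorEq, false_iff, not_not]
    have hq : q ∈ E := List.mem_of_find?_eq_some hf
    have hqx : key q = x := by simpa using List.find?_some hf
    exact List.mem_map.mpr ⟨q, hq, hqx⟩

theorem pvAssoc_eq_some_iff (key val : String × String → String) (E : List (String × String))
    (hnd : (E.map key).Nodup) (x y : String) :
    pvAssoc key val E x = some y ↔ ∃ p ∈ E, key p = x ∧ val p = y := by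
  constructor
  · exact pvAssoc_mem key val E x y
  · rintro ⟨p, hp, hpx, rfl⟩
    unfold pvAssoc
    cases hf : E.find? (fun q => key q == x) with
    | none =>
      exfalso
      have := List.find?_eq_none.mp hf p hp
      simp [hpx] at this
    | some q =>
      have hq : q ∈ E := List.mem_of_find?_eq_some hf
      have hqx : key q = x := by simpa using List.find?_some hf
      have : p = q := List.inj_on_of_nodup_map hnd hp hq (by rw [hpx, hqx])
      subst this
      rfl

theorem pvAssoc_fst_iff (E : List (String × String)) (hnd : (E.map Prod.fst).Nodup)
    (x y : String) : pvAssoc Prod.fst Prod.snd E x = some y ↔ (x, y) ∈ E := by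
  rw [pvAssoc_eq_some_iff Prod.fst Prod.snd E hnd]
  constructor
  · rintro ⟨p, hp, h1, h2⟩; rwa [← h1, ← h2]
  · intro hxy; exact ⟨(x, y), hxy, rfl, rfl⟩

theorem pvAssoc_snd_iff (E : List (String × String)) (hnd : (E.map Prod.snd).Nodup)
    (x y : String) : pvAssoc Prod.snd Prod.fst E y = some x ↔ (x, y) ∈ E := by
  rw [pvAssoc_eq_some_iff Prod.snd Prod.fst E hnd]
  constructor
  · rintro ⟨p, hp, h1, h2⟩; rw [← h1, ← h2]; exact hp
  · intro hxy; exact ⟨(x, y), hxy, rfl, rfl⟩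

theorem pvAssoc_append (key val : String × String → String) (E : List (String × String))
    (p : String × String) (x : String) :
    pvAssoc key val (E ++ [p]) x =
      match pvAssoc key val E x with
      | some v => some v
      | none => if key p = x then some (val p) else none := by
  unfold pvAssoc
  rw [List.find?_append]
  cases hf : E.find? (fun q => key q == x) with
  | some q => simp
  | none =>
    by_cases hx : key p = x
    · simp [List.find?, hx]
    · have hbx : (key p == x) = false := beq_eq_false_iff_ne.mpr hx
      simp [List.find?, hbx, hx]

-- ---------- chain lemmas ----------

theorem pvChain_ne_nil (f : String → Option String) (h : String) (L : List String)
    (hc : PvChain f h L) : L ≠ [] := by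
  intro hnil
  rw [hnil] at hc
  exact absurd hc.1 (by simp)

-- deterministic chains from the same start are equal
theorem pvChain_unique (f : String → Option String) :
    ∀ (L1 L2 : List String) (h : String), PvChain f h L1 → PvChain f h L2 → L1 = L2 := by
  intro L1
  induction L1 with
  | nil => intro L2 h hc1 _; exact absurd hc1.1 (by simp)
  | cons x t1 ih =>
    intro L2 h hc1 hc2
    obtain ⟨hh1, hch1, t1', hl1, hf1⟩ := hc1
    obtain ⟨hh2, hch2, t2', hl2, hf2⟩ := hc2
    cases L2 with
    | nil => simp at hh2
    | cons x2 t2 =>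
      have hx2 : x2 = x := by
        simp only [List.head?_cons] at hh1 hh2
        rw [← Option.some_inj, hh2, hh1]
      subst x2
      cases t1 with
      | nil =>
        have hfx : f x = none := by
          simp only [List.getLast?_singleton, Option.some_inj] at hl1
          subst hl1
          exact hf1
        cases t2 with
        | nil => rfl
        | cons y2 t2'' =>
          have hbad := (List.isChain_cons_cons.mp hch2).1
          rw [hfx] at hbad
          cases hbad
      | cons y t1'' =>
        have hxy : f x = some y := (List.isChain_cons_cons.mp hch1).1
        cases t2 with
        | nil =>
          have hfx : f x = none := by
            simp only [List.getLast?_singleton, Option.some_inj] at hl2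
            subst hl2
            exact hf2
          rw [hfx] at hxy
          cases hxy
        | cons y2 t2'' =>
          have hxy2 : f x = some y2 := (List.isChain_cons_cons.mp hch2).1
          have hy : y2 = y := by
            rw [hxy] at hxy2
            exact (Option.some_inj.mp hxy2).symm
          subst y2
          rw [List.getLast?_cons_cons] at hl1 hl2
          have heq : y :: t1'' = y :: t2'' := by
            apply ih (y :: t2'') y
            · exact ⟨rfl, (List.isChain_cons_cons.mp hch1).2, ⟨t1', hl1, hf1⟩⟩
            · exact ⟨rfl, (List.isChain_cons_cons.mp hch2).2, ⟨t2', hl2, hf2⟩⟩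
          rw [heq]

-- a chain reverses to a chain of the inverse map
theorem pvChain_reverse (f g : String → Option String)
    (hfg : ∀ x y, f x = some y ↔ g y = some x) (h t : String) (L : List String)
    (hc : PvChain f h L) (hlast : L.getLast? = some t) (hgh : g h = none) :
    PvChain g t L.reverse := by
  obtain ⟨hh, hch, _, _, _⟩ := hc
  refine ⟨by rw [List.head?_reverse]; exact hlast, ?_, ⟨h, by rw [List.getLast?_reverse]; exact hh, hgh⟩⟩
  rw [List.isChain_reverse]
  exact hch.imp (fun a b hab => (hfg a b).mp hab)

-- a properly-terminated walk is a chain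
theorem pvWalk_isChain (f : String → Option String) :
    ∀ (n : Nat) (c : String), List.IsChain (fun x y => f x = some y) (pvWalk f n c) := by
  intro n
  induction n with
  | zero => intro c; simp [pvWalk]
  | succ k ih =>
    intro c
    cases hc : f c with
    | none => simp [pvWalk, hc]
    | some d =>
      simp only [pvWalk, hc]
      rw [pvWalk_head f k d]
      refine List.isChain_cons_cons.mpr ⟨hc, ?_⟩
      rw [← pvWalk_head f k d]
      exact ih d

theorem pvWalk_pvChain (f : String → Option String) (n : Nat) (c : String)
    (hproper : f ((pvWalk f n c).getLast (pvWalk_ne_nil f n c)) = none) :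
    PvChain f c (pvWalk f n c) := by
  refine ⟨?_, pvWalk_isChain f n c, ⟨(pvWalk f n c).getLast (pvWalk_ne_nil f n c),
    List.getLast?_eq_some_getLast _, hproper⟩⟩
  rw [pvWalk_head f n c]
  simp

-- glue a linked prefix onto a chain
theorem pvChain_append (f : String → Option String) (h0 a b : String) (L0 R : List String)
    (hL0ne : L0 ≠ []) (hhead : L0.head? = some h0)
    (hch0 : List.IsChain (fun x y => f x = some y) L0)
    (hlast0 : L0.getLast? = some a) (hab : f a = some b) (hR : PvChain f b R) :
    PvChain f h0 (L0 ++ R) := by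
  obtain ⟨hhR, hchR, tR, hlR, hfR⟩ := hR
  have hRne : R ≠ [] := by intro hnil; rw [hnil] at hhR; simp at hhR
  refine ⟨?_, ?_, ⟨tR, ?_, hfR⟩⟩
  · rw [List.head?_append_of_ne_nil _ hL0ne]
    exact hhead
  · rw [List.isChain_append]
    refine ⟨hch0, hchR, ?_⟩
    intro x hx y hy
    rw [hlast0] at hx
    rw [hhR] at hy
    simp at hx hy
    rw [← hx, ← hy]
    exact hab
  · rw [List.getLast?_append_of_ne_nil _ hRne]
    exact hlR

-- ---------- dict lemmas (erase is not covered by the PySem lemma book) ----------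

theorem pv_find?_filter_erase {ν : Type} (l : List (String × ν)) (k x : String) :
    (l.filter (fun p => !(p.1 == k))).find? (fun p => p.1 == x)
      = if x = k then none else l.find? (fun p => p.1 == x) := by
  induction l with
  | nil => simp
  | cons p t ih =>
    by_cases hpk : p.1 = k
    · rw [List.filter_cons_of_neg (by simp [hpk])]
      rw [ih]
      by_cases hx : x = k
      · simp [hx]
      · have h2 : (p.1 == x) = false := beq_eq_false_iff_ne.mpr (fun he => hx (he ▸ hpk ▸ rfl))
        simp only [if_neg hx]
        simp [List.find?, h2]
    · rw [List.filter_cons_of_pos (by simp [hpk])]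
      by_cases hpx : p.1 = x
      · by_cases hx : x = k
        · exact absurd (hx ▸ hpx) hpk
        · simp [List.find?, hpx, hx]
      · have h2 : (p.1 == x) = false := beq_eq_false_iff_ne.mpr hpx
        simp [List.find?, h2, ih]

theorem pv_get?_erase {ν : Type} (d : PySem.Dict String ν) (k x : String) :
    (d.erase k).get? x = if x = k then none else d.get? x := by
  have h1 : (d.erase k).get? x
      = Option.map (fun p => p.2)
          ((d.items.filter (fun p => !(p.1 == k))).find? (fun p => p.1 == x)) := rfl
  have h2 : d.get? x = Option.map (fun p => p.2) (d.items.find? (fun p => p.1 == x)) := rfl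
  rw [h1, h2, pv_find?_filter_erase]
  by_cases hx : x = k <;> simp [hx]

theorem pv_nodup_keys_erase {ν : Type} (d : PySem.Dict String ν) (k : String)
    (hnd : d.keys.Nodup) : (d.erase k).keys.Nodup := by
  have hsub : (d.erase k).items.Sublist d.items := List.filter_sublist
  exact (hsub.map Prod.fst).nodup hnd

-- ---------- B-side top-level lemmas ----------

-- every key of E that is not a successor reaches a unique chain; a node of the graph that
-- is a successor but not a key is the tail of exactly one chain: existence by walking the
-- inverted map backward, uniqueness by reversing both chains
theorem pv_exists_head (E : List (String × String))
    (hfsE : (E.map Prod.fst).Nodup) (hssE : (E.map Prod.snd).Nodup) (a : String)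
    (haS : a ∈ E.map Prod.snd) (hafs : a ∉ E.map Prod.fst) :
    ∃ h0 W, h0 ∈ E.map Prod.fst ∧ h0 ∉ E.map Prod.snd ∧
      PvChain (pvAssoc Prod.fst Prod.snd E) h0 W ∧ W.getLast? = some a := by
  have hinj : ∀ y1 y2 x, pvAssoc Prod.snd Prod.fst E y1 = some x →
      pvAssoc Prod.snd Prod.fst E y2 = some x → y1 = y2 := by
    intro y1 y2 x h1 h2
    obtain ⟨p1, hp1, hp1k, hp1v⟩ := pvAssoc_mem _ _ E y1 x h1
    obtain ⟨p2, hp2, hp2k, hp2v⟩ := pvAssoc_mem _ _ E y2 x h2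
    have : p1 = p2 := List.inj_on_of_nodup_map hfsE hp1 hp2 (by rw [hp1v, hp2v])
    rw [← hp1k, ← hp2k, this]
  have hnos : ∀ y, pvAssoc Prod.snd Prod.fst E y ≠ some a := by
    intro y hy
    obtain ⟨p, hp, _, hpv⟩ := pvAssoc_mem _ _ E y a hy
    exact hafs (List.mem_map.mpr ⟨p, hp, hpv⟩)
  have hrange : ∀ x y, pvAssoc Prod.snd Prod.fst E y = some x → x ∈ E.map Prod.fst := by
    intro x y hy
    obtain ⟨p, hp, _, hpv⟩ := pvAssoc_mem _ _ E y x hy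
    exact List.mem_map.mpr ⟨p, hp, hpv⟩
  have hproper := pvWalk_proper_of (pvAssoc Prod.snd Prod.fst E) a (E.map Prod.fst)
    ((E.map Prod.fst).length + 1) hrange hinj hnos (le_refl _)
  have chainW := pvWalk_pvChain (pvAssoc Prod.snd Prod.fst E) ((E.map Prod.fst).length + 1) a hproper
  obtain ⟨h0, hl0⟩ : ∃ h0, (pvWalk (pvAssoc Prod.snd Prod.fst E) ((E.map Prod.fst).length + 1) a).getLast
      (pvWalk_ne_nil _ _ _) = h0 := ⟨_, rfl⟩
  have hl0? : (pvWalk (pvAssoc Prod.snd Prod.fst E) ((E.map Prod.fst).length + 1) a).getLast?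
      = some h0 := by rw [List.getLast?_eq_some_getLast (pvWalk_ne_nil _ _ _), hl0]
  have hg0 : pvAssoc Prod.snd Prod.fst E h0 = none := by rw [← hl0]; exact hproper
  have h0ns : h0 ∉ E.map Prod.snd := (pvAssoc_none _ _ E h0).mp hg0
  have hga : pvAssoc Prod.snd Prod.fst E a ≠ none := by
    intro hnone
    exact absurd haS ((pvAssoc_none _ _ E a).mp hnone)
  have h0ne : h0 ≠ a := by
    intro heq
    rw [heq] at hg0
    exact hga hg0
  have h0fs : h0 ∈ E.map Prod.fst := by
    have hmem : h0 ∈ pvWalk (pvAssoc Prod.snd Prod.fst E) ((E.map Prod.fst).length + 1) a := by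
      rw [← hl0]; exact List.getLast_mem _
    rcases mem_pvWalk _ _ _ _ hmem with heq | ⟨y, hy⟩
    · exact absurd heq h0ne
    · exact hrange h0 y hy
  have hfg : ∀ x y, pvAssoc Prod.snd Prod.fst E x = some y ↔ pvAssoc Prod.fst Prod.snd E y = some x := by
    intro x y
    rw [pvAssoc_fst_iff E hfsE, pvAssoc_snd_iff E hssE]
  have hfa : pvAssoc Prod.fst Prod.snd E a = none := (pvAssoc_none _ _ E a).mpr hafs
  have chainRev := pvChain_reverse (pvAssoc Prod.snd Prod.fst E) (pvAssoc Prod.fst Prod.snd E)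
    hfg a h0 _ chainW hl0? hfa
  refine ⟨h0, _, h0fs, h0ns, chainRev, ?_⟩
  rw [List.getLast?_reverse]
  rw [pvWalk_head]
  simp

theorem pv_chain_tail_unique (E : List (String × String))
    (hfsE : (E.map Prod.fst).Nodup) (hssE : (E.map Prod.snd).Nodup)
    (h1 h2 t : String) (L1 L2 : List String)
    (hc1 : PvChain (pvAssoc Prod.fst Prod.snd E) h1 L1) (h1ns : h1 ∉ E.map Prod.snd)
    (hc2 : PvChain (pvAssoc Prod.fst Prod.snd E) h2 L2) (h2ns : h2 ∉ E.map Prod.snd)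
    (hl1 : L1.getLast? = some t) (hl2 : L2.getLast? = some t) :
    L1 = L2 ∧ h1 = h2 := by
  have hfg : ∀ x y, pvAssoc Prod.fst Prod.snd E x = some y ↔ pvAssoc Prod.snd Prod.fst E y = some x := by
    intro x y
    rw [pvAssoc_fst_iff E hfsE, pvAssoc_snd_iff E hssE]
  have hg1 : pvAssoc Prod.snd Prod.fst E h1 = none := (pvAssoc_none _ _ E h1).mpr h1ns
  have hg2 : pvAssoc Prod.snd Prod.fst E h2 = none := (pvAssoc_none _ _ E h2).mpr h2ns
  have r1 := pvChain_reverse _ _ hfg h1 t L1 hc1 hl1 hg1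
  have r2 := pvChain_reverse _ _ hfg h2 t L2 hc2 hl2 hg2
  have hrev := pvChain_unique (pvAssoc Prod.snd Prod.fst E) L1.reverse L2.reverse t r1 r2
  have hL : L1 = L2 := by
    have := congrArg List.reverse hrev
    simpa using this
  refine ⟨hL, ?_⟩
  have e1 := hc1.1
  have e2 := hc2.1
  rw [hL] at e1
  -- e1 : L2.head? = some h1, e2 : L2.head? = some h2
  exact Option.some_inj.mp (e1.symm.trans e2)

-- generic builder: the updated dict satisfies the invariant for E ++ [(a,b)] once the new
-- entry and the effect on old entries are described
theorem pvInv_build (E : List (String × String)) (a b : String)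
    (C C' : PySem.Dict String (List String)) (K : String) (V : List String) (D : Option String)
    (ha : a ∉ E.map Prod.fst) (hb : b ∉ E.map Prod.snd)
    (hinv : PvInv E C)
    (hnod' : C'.keys.Nodup)
    (hC' : ∀ h, C'.get? h = if h = K then some V else if some h = D then none else C.get? h)
    (hKfs' : K ∈ (E ++ [(a, b)]).map Prod.fst)
    (hVgood : K ∉ (E ++ [(a, b)]).map Prod.snd →
      PvChain (pvAssoc Prod.fst Prod.snd (E ++ [(a, b)])) K V ∧
      ∃ z, V.getLast? = some z ∧ z ∈ (E ++ [(a, b)]).map Prod.snd)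
    (hVbog : K ∈ (E ++ [(a, b)]).map Prod.snd →
      ∃ z, V.getLast? = some z ∧ z ∈ (E ++ [(a, b)]).map Prod.fst)
    (hD : ∀ e, D = some e → e ∈ (E ++ [(a, b)]).map Prod.snd)
    (hKa : a ∉ (E ++ [(a, b)]).map Prod.snd → K = a)
    (hztail : ∀ h L z, h ≠ K → C.get? h = some L → h ∉ E.map Prod.snd →
      L.getLast? = some z → z ≠ a)
    (hbcov : b = K ∨ D = some b ∨ C.get? b = none) :
    PvInv (E ++ [(a, b)]) C' := by
  obtain ⟨hnodC, hsound, hcomp⟩ := hinv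
  have hmemf : ∀ x, x ∈ (E ++ [(a, b)]).map Prod.fst ↔ (x ∈ E.map Prod.fst ∨ x = a) := by
    intro x; simp
  have hmems : ∀ x, x ∈ (E ++ [(a, b)]).map Prod.snd ↔ (x ∈ E.map Prod.snd ∨ x = b) := by
    intro x; simp
  have himp : ∀ x y, pvAssoc Prod.fst Prod.snd E x = some y →
      pvAssoc Prod.fst Prod.snd (E ++ [(a, b)]) x = some y := by
    intro x y hxy
    obtain ⟨p, hp, hpk, _⟩ := pvAssoc_mem _ _ E x y hxy
    rw [pvAssoc_append, hxy]
  refine ⟨hnod', ?_, ?_⟩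
  · intro h L hget
    rw [hC'] at hget
    by_cases hK : h = K
    · subst hK
      rw [if_pos rfl] at hget
      have hLV : L = V := by injection hget.symm
      subst hLV
      refine ⟨hKfs', fun hns => hVgood hns, fun hs => hVbog hs⟩
    · rw [if_neg hK] at hget
      by_cases hDh : some h = D
      · rw [if_pos hDh] at hget; cases hget
      · rw [if_neg hDh] at hget
        obtain ⟨hhfs, hgood, hbog⟩ := hsound h L hget
        refine ⟨(hmemf h).mpr (Or.inl hhfs), ?_, ?_⟩
        · intro hns'
          have hns : h ∉ E.map Prod.snd := fun hmem => hns' ((hmems h).mpr (Or.inl hmem))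
          obtain ⟨hchain, z, hz, hzss⟩ := hgood hns
          have hza : z ≠ a := hztail h L z hK hget hns hz
          refine ⟨⟨?_, hchain.2.1.imp himp, ⟨z, hz, ?_⟩⟩, ⟨z, hz, (hmems z).mpr (Or.inl hzss)⟩⟩
          · exact hchain.1
          · obtain ⟨t, ht, hft⟩ := hchain.2.2
            have htz : t = z := by rw [ht] at hz; injection hz
            subst htz
            rw [pvAssoc_append, hft]
            simp [Ne.symm hza]
        · intro hs'
          rcases (hmems h).mp hs' with hs | hbeq
          · obtain ⟨z, hz, hzfs⟩ := hbog hs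
            exact ⟨z, hz, (hmemf z).mpr (Or.inl hzfs)⟩
          · subst hbeq
            rcases hbcov with hcov | hcov | hcov
            · exact absurd hcov hK
            · exact absurd hcov.symm hDh
            · rw [hcov] at hget; cases hget
  · intro h hfs' hns'
    by_cases hK : h = K
    · exact ⟨V, by rw [hC', if_pos hK]⟩
    · rcases (hmemf h).mp hfs' with hfsm | hha
      · have hns : h ∉ E.map Prod.snd := fun hmem => hns' ((hmems h).mpr (Or.inl hmem))
        obtain ⟨L, hL⟩ := hcomp h hfsm hns
        refine ⟨L, ?_⟩
        rw [hC', if_neg hK, if_neg ?_]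
        · exact hL
        · intro hDh
          exact hns' (hD h hDh.symm)
      · subst hha
        exact absurd (hKa hns') (Ne.symm hK)

-- the stitching step preserves the invariant
theorem pvStitch_step (E : List (String × String)) (ab : String × String)
    (C : PySem.Dict String (List String))
    (hfs : ((E ++ [ab]).map Prod.fst).Nodup)
    (hss : ((E ++ [ab]).map Prod.snd).Nodup)
    (hinv : PvInv E C) :
    PvInv (E ++ [ab]) (pvStitchStep C ab) := by
  obtain ⟨a, b⟩ := ab
  have hfsapp : (E.map Prod.fst ++ [a]).Nodup := by simpa using hfs
  have hssapp : (E.map Prod.snd ++ [b]).Nodup := by simpa using hss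
  obtain ⟨hfsE, -, hdisjf⟩ := List.nodup_append.mp hfsapp
  obtain ⟨hssE, -, hdisjs⟩ := List.nodup_append.mp hssapp
  have ha : a ∉ E.map Prod.fst := fun hmem => hdisjf a hmem a (by simp) rfl
  have hb : b ∉ E.map Prod.snd := fun hmem => hdisjs b hmem b (by simp) rfl
  have hCa : C.get? a = none := by
    cases hga : C.get? a with
    | none => rfl
    | some L => exact absurd (hinv.2.1 a L hga).1 ha
  have hpredchar : ∀ (hc : String × List String),
      (((PySem.List.pyGet? hc.2 (-1)) == some a) = true ↔ hc.2.getLast? = some a) := by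
    intro hc
    rw [PySem.List.pyGet?_neg_one]
    exact beq_iff_eq
  have hfE'a : pvAssoc Prod.fst Prod.snd (E ++ [(a, b)]) a = some b := by
    rw [pvAssoc_append]
    rw [(pvAssoc_none Prod.fst Prod.snd E a).mpr ha]
    simp
  have hfE'fresh : ∀ x, x ≠ a → x ∉ E.map Prod.fst →
      pvAssoc Prod.fst Prod.snd (E ++ [(a, b)]) x = none := by
    intro x hxa hxfs
    rw [pvAssoc_append]
    rw [(pvAssoc_none Prod.fst Prod.snd E x).mpr hxfs]
    simp [Ne.symm hxa]
  have himp : ∀ x y, pvAssoc Prod.fst Prod.snd E x = some y →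
      pvAssoc Prod.fst Prod.snd (E ++ [(a, b)]) x = some y := by
    intro x y hxy
    rw [pvAssoc_append, hxy]
  -- b is never already a key of C: if it were, it would be a head, and we use that entry
  have hbfs_of_some : ∀ Cb, C.get? b = some Cb → b ∈ E.map Prod.fst := by
    intro Cb hgb
    exact (hinv.2.1 b Cb hgb).1
  have hbgood : ∀ Cb, C.get? b = some Cb →
      PvChain (pvAssoc Prod.fst Prod.snd E) b Cb ∧
      ∃ z, Cb.getLast? = some z ∧ z ∈ E.map Prod.snd := by
    intro Cb hgb
    exact (hinv.2.1 b Cb hgb).2.1 hb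
  have hbnone_notfs : C.get? b = none → b ∉ E.map Prod.fst := by
    intro hgb hbfs
    obtain ⟨L, hL⟩ := hinv.2.2 b hbfs hb
    rw [hgb] at hL
    cases hL
  by_cases hcase : a ∈ E.map Prod.snd
  · -- a is already a successor: some chain ends at a, found by the scan
    obtain ⟨h0, W, h0fs, h0ns, hWchain, hWlast⟩ := pv_exists_head E hfsE hssE a hcase ha
    obtain ⟨L0, hL0⟩ := hinv.2.2 h0 h0fs h0ns
    obtain ⟨hchain0, z0, hz0, hz0ss⟩ := (hinv.2.1 h0 L0 hL0).2.1 h0ns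
    have hL0W : L0 = W := pvChain_unique _ L0 W h0 hchain0 hWchain
    have hlast0 : L0.getLast? = some a := by rw [hL0W]; exact hWlast
    have hL0ne : L0 ≠ [] := pvChain_ne_nil _ _ _ hchain0
    have hfind : C.items.find? (fun hc => PySem.List.pyGet? hc.2 (-1) == some a)
        = some (h0, L0) := by
      cases hfind : C.items.find? (fun hc => PySem.List.pyGet? hc.2 (-1) == some a) with
      | none =>
        exfalso
        have hmem : (h0, L0) ∈ C.items :=
          (PySem.Dict.get?_eq_some_iff_mem_items C h0 L0 hinv.1).mp hL0
        have := List.find?_eq_none.mp hfind (h0, L0) hmem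
        exact this ((hpredchar (h0, L0)).mpr hlast0)
      | some kL =>
        obtain ⟨k, L'⟩ := kL
        have hmem : (k, L') ∈ C.items := List.mem_of_find?_eq_some hfind
        have hlastc : L'.getLast? = some a := by
          have hpt := List.find?_some (p := fun hc : String × List String => PySem.List.pyGet? hc.2 (-1) == some a) hfind
          exact (hpredchar (k, L')).mp hpt
        have hgethc : C.get? k = some L' := PySem.Dict.get?_of_mem_items C hmem hinv.1
        obtain ⟨hhfs, hgood, hbog⟩ := hinv.2.1 k L' hgethc
        by_cases hcs : k ∈ E.map Prod.snd
        · exfalso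
          obtain ⟨z, hz, hzfs⟩ := hbog hcs
          have hza : z = a := by rw [hz] at hlastc; injection hlastc
          exact ha (hza ▸ hzfs)
        · obtain ⟨hchainc, _, _, _⟩ := hgood hcs
          obtain ⟨hLeq, hheq⟩ := pv_chain_tail_unique E hfsE hssE k h0 a L' L0
            hchainc hcs hchain0 h0ns hlastc hlast0
          rw [hheq, hLeq]
    have hgetD0 : C.getD h0 [a] = L0 := PySem.Dict.getD_of_get?_eq_some C [a] hL0
    -- no other chain of E ends at a
    have hztail : ∀ h L z, h ≠ h0 → C.get? h = some L → h ∉ E.map Prod.snd →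
        L.getLast? = some z → z ≠ a := by
      intro h L z hne hget hns hz hza
      subst hza
      obtain ⟨hchainh, _, _, _⟩ := (hinv.2.1 h L hget).2.1 hns
      obtain ⟨_, hheq⟩ := pv_chain_tail_unique E hfsE hssE h h0 z L L0
        hchainh hns hchain0 h0ns hz hlast0
      exact hne hheq
    by_cases hbh : b = h0
    · -- the new pair closes a cycle: the entry becomes a leftover
      subst hbh
      have hstep : pvStitchStep C (a, b) = (C.erase b).insert b (L0 ++ L0) := by
        simp only [pvStitchStep, hfind, Option.map_some, Option.getD_some]
        have hpop : C.pop? b = some (L0, C.erase b) := by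
          simp [PySem.Dict.pop?, hL0]
        rw [hpop, hgetD0]
      rw [hstep]
      refine pvInv_build E a b C _ b (L0 ++ L0) none ha hb
        ⟨hinv.1, hinv.2.1, hinv.2.2⟩ ?_ ?_ ?_ ?_ ?_ ?_ ?_ hztail (Or.inl rfl)
      · exact PySem.Dict.nodup_keys_insert _ _ _ (pv_nodup_keys_erase C b hinv.1)
      · intro h
        rw [PySem.Dict.get?_insert, pv_get?_erase]
        by_cases hK : h = b <;> simp [hK]
      · simp only [List.map_append, List.mem_append]
        exact Or.inl h0fs
      · intro hns
        exact absurd (by simp : b ∈ (E ++ [(a, b)]).map Prod.snd) hns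
      · intro _
        refine ⟨a, ?_, by simp⟩
        rw [List.getLast?_append_of_ne_nil _ hL0ne]
        exact hlast0
      · intro e he; cases he
      · intro hans
        exact absurd (by simp [hcase] : a ∈ (E ++ [(a, b)]).map Prod.snd) hans
    · -- extend the chain ending at a with the pair and the chain starting at b
      cases hgb : C.get? b with
      | some Cb =>
        obtain ⟨hchainb, zb, hzb, hzbss⟩ := hbgood Cb hgb
        have hzba : zb ≠ a := hztail b Cb zb hbh hgb hb hzb
        have hCbne : Cb ≠ [] := pvChain_ne_nil _ _ _ hchainb
        have hstep : pvStitchStep C (a, b) = (C.erase b).insert h0 (L0 ++ Cb) := by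
          simp only [pvStitchStep, hfind, Option.map_some, Option.getD_some]
          have hpop : C.pop? b = some (Cb, C.erase b) := by
            simp [PySem.Dict.pop?, hgb]
          rw [hpop, hgetD0]
        rw [hstep]
        have hchain' : PvChain (pvAssoc Prod.fst Prod.snd (E ++ [(a, b)])) h0 (L0 ++ Cb) := by
          refine pvChain_append _ h0 a b L0 Cb hL0ne hchain0.1 (hchain0.2.1.imp himp) hlast0 hfE'a ?_
          refine ⟨hchainb.1, hchainb.2.1.imp himp, ⟨zb, hzb, ?_⟩⟩
          obtain ⟨t, ht, hft⟩ := hchainb.2.2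
          have htz : t = zb := by rw [ht] at hzb; injection hzb
          subst htz
          rw [pvAssoc_append, hft]
          simp [Ne.symm hzba]
        refine pvInv_build E a b C _ h0 (L0 ++ Cb) (some b) ha hb
          ⟨hinv.1, hinv.2.1, hinv.2.2⟩ ?_ ?_ ?_ ?_ ?_ ?_ ?_ hztail (Or.inr (Or.inl rfl))
        · exact PySem.Dict.nodup_keys_insert _ _ _ (pv_nodup_keys_erase C b hinv.1)
        · intro h
          rw [PySem.Dict.get?_insert, pv_get?_erase]
          by_cases hK : h = h0
          · simp [hK]
          · by_cases hB : h = b <;> simp [hK, hB]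
        · simp only [List.map_append, List.mem_append]
          exact Or.inl h0fs
        · intro _
          refine ⟨hchain', ⟨zb, ?_, by simp [hzbss]⟩⟩
          rw [List.getLast?_append_of_ne_nil _ hCbne]
          exact hzb
        · intro hs
          exfalso
          simp only [List.map_append, List.mem_append] at hs
          rcases hs with hs | hs
          · exact h0ns hs
          · simp at hs
            exact hbh hs.symm
        · intro e he
          have heb : e = b := by injection he with h; exact h.symm
          simp [heb]
        · intro hans
          exact absurd (by simp [hcase] : a ∈ (E ++ [(a, b)]).map Prod.snd) hans
      | none =>
        have hbnfs : b ∉ E.map Prod.fst := hbnone_notfs hgb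
        have hba : b ≠ a := fun he => hb (by rw [he]; exact hcase)
        have hstep : pvStitchStep C (a, b) = C.insert h0 (L0 ++ [b]) := by
          simp only [pvStitchStep, hfind, Option.map_some, Option.getD_some]
          have hpop : C.pop? b = none := by
            simp [PySem.Dict.pop?, hgb]
          rw [hpop, hgetD0]
        rw [hstep]
        have hchain' : PvChain (pvAssoc Prod.fst Prod.snd (E ++ [(a, b)])) h0 (L0 ++ [b]) := by
          refine pvChain_append _ h0 a b L0 [b] hL0ne hchain0.1 (hchain0.2.1.imp himp) hlast0 hfE'a ?_
          exact ⟨rfl, by simp, ⟨b, rfl, hfE'fresh b hba hbnfs⟩⟩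
        refine pvInv_build E a b C _ h0 (L0 ++ [b]) none ha hb
          ⟨hinv.1, hinv.2.1, hinv.2.2⟩ ?_ ?_ ?_ ?_ ?_ ?_ ?_ hztail (Or.inr (Or.inr hgb))
        · exact PySem.Dict.nodup_keys_insert _ _ _ hinv.1
        · intro h
          rw [PySem.Dict.get?_insert]
          by_cases hK : h = h0 <;> simp [hK]
        · simp only [List.map_append, List.mem_append]
          exact Or.inl h0fs
        · intro _
          exact ⟨hchain', ⟨b, by simp, by simp⟩⟩
        · intro hs
          exfalso
          simp only [List.map_append, List.mem_append] at hs
          rcases hs with hs | hs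
          · exact h0ns hs
          · simp at hs
            exact hbh hs.symm
        · intro e he; cases he
        · intro hans
          exact absurd (by simp [hcase] : a ∈ (E ++ [(a, b)]).map Prod.snd) hans
  · -- a is fresh: no chain ends at a, the scan finds nothing
    have hfind : C.items.find? (fun hc => PySem.List.pyGet? hc.2 (-1) == some a) = none := by
      cases hfind : C.items.find? (fun hc => PySem.List.pyGet? hc.2 (-1) == some a) with
      | none => rfl
      | some kL =>
        exfalso
        obtain ⟨k, L'⟩ := kL
        have hmem : (k, L') ∈ C.items := List.mem_of_find?_eq_some hfind
        have hlastc : L'.getLast? = some a := by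
          have hpt := List.find?_some (p := fun hc : String × List String => PySem.List.pyGet? hc.2 (-1) == some a) hfind
          exact (hpredchar (k, L')).mp hpt
        have hgethc : C.get? k = some L' := PySem.Dict.get?_of_mem_items C hmem hinv.1
        obtain ⟨hhfs, hgood, hbog⟩ := hinv.2.1 k L' hgethc
        by_cases hcs : k ∈ E.map Prod.snd
        · obtain ⟨z, hz, hzfs⟩ := hbog hcs
          have hza : z = a := by rw [hz] at hlastc; injection hlastc
          exact ha (hza ▸ hzfs)
        · obtain ⟨_, z, hz, hzss⟩ := hgood hcs
          have hza : z = a := by rw [hz] at hlastc; injection hlastc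
          exact hcase (hza ▸ hzss)
    have hgetDa : C.getD a [a] = [a] := by
      rw [PySem.Dict.getD_eq_get?_getD, hCa]
      rfl
    have hztail : ∀ h L z, h ≠ a → C.get? h = some L → h ∉ E.map Prod.snd →
        L.getLast? = some z → z ≠ a := by
      intro h L z _ hget hns hz hza
      subst hza
      obtain ⟨_, z', hz', hzss'⟩ := (hinv.2.1 h L hget).2.1 hns
      have : z' = z := by rw [hz'] at hz; injection hz
      exact hcase (this ▸ hzss')
    by_cases hba : b = a
    · -- a self-loop on a fresh node: leftover entry, never consulted
      subst hba
      have hstep : pvStitchStep C (b, b) = C.insert b ([b] ++ [b]) := by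
        simp only [pvStitchStep, hfind, Option.map_none, Option.getD_none]
        have hpop : C.pop? b = none := by
          simp [PySem.Dict.pop?, hCa]
        rw [hpop, hgetDa]
      rw [hstep]
      refine pvInv_build E b b C _ b ([b] ++ [b]) none ha hb
        ⟨hinv.1, hinv.2.1, hinv.2.2⟩ ?_ ?_ ?_ ?_ ?_ ?_ ?_ hztail (Or.inl rfl)
      · exact PySem.Dict.nodup_keys_insert _ _ _ hinv.1
      · intro h
        rw [PySem.Dict.get?_insert]
        by_cases hK : h = b <;> simp [hK]
      · simp
      · intro hns
        exact absurd (by simp : b ∈ (E ++ [(b, b)]).map Prod.snd) hns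
      · intro _
        exact ⟨b, by simp, by simp⟩
      · intro e he; cases he
      · intro _; rfl
    · -- a fresh two-node chain (or extended by the chain starting at b)
      cases hgb : C.get? b with
      | some Cb =>
        obtain ⟨hchainb, zb, hzb, hzbss⟩ := hbgood Cb hgb
        have hzba : zb ≠ a := fun he => hcase (he ▸ hzbss)
        have hCbne : Cb ≠ [] := pvChain_ne_nil _ _ _ hchainb
        have hstep : pvStitchStep C (a, b) = (C.erase b).insert a ([a] ++ Cb) := by
          simp only [pvStitchStep, hfind, Option.map_none, Option.getD_none]
          have hpop : C.pop? b = some (Cb, C.erase b) := by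
            simp [PySem.Dict.pop?, hgb]
          rw [hpop, hgetDa]
        rw [hstep]
        have hchain' : PvChain (pvAssoc Prod.fst Prod.snd (E ++ [(a, b)])) a ([a] ++ Cb) := by
          refine pvChain_append _ a a b [a] Cb (by simp) rfl (by simp) rfl hfE'a ?_
          refine ⟨hchainb.1, hchainb.2.1.imp himp, ⟨zb, hzb, ?_⟩⟩
          obtain ⟨t, ht, hft⟩ := hchainb.2.2
          have htz : t = zb := by rw [ht] at hzb; injection hzb
          subst htz
          rw [pvAssoc_append, hft]
          simp [Ne.symm hzba]
        refine pvInv_build E a b C _ a ([a] ++ Cb) (some b) ha hb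
          ⟨hinv.1, hinv.2.1, hinv.2.2⟩ ?_ ?_ ?_ ?_ ?_ ?_ ?_ hztail (Or.inr (Or.inl rfl))
        · exact PySem.Dict.nodup_keys_insert _ _ _ (pv_nodup_keys_erase C b hinv.1)
        · intro h
          rw [PySem.Dict.get?_insert, pv_get?_erase]
          by_cases hK : h = a
          · simp [hK]
          · by_cases hB : h = b <;> simp [hK, hB]
        · simp
        · intro _
          refine ⟨hchain', ⟨zb, ?_, by simp [hzbss]⟩⟩
          rw [List.getLast?_append_of_ne_nil _ hCbne]
          exact hzb
        · intro hs
          exfalso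
          simp only [List.map_append, List.mem_append] at hs
          rcases hs with hs | hs
          · exact hcase hs
          · simp at hs
            exact hba hs.symm
        · intro e he
          have heb : e = b := by injection he with h; exact h.symm
          simp [heb]
        · intro _; rfl
      | none =>
        have hbnfs : b ∉ E.map Prod.fst := hbnone_notfs hgb
        have hstep : pvStitchStep C (a, b) = C.insert a ([a] ++ [b]) := by
          simp only [pvStitchStep, hfind, Option.map_none, Option.getD_none]
          have hpop : C.pop? b = none := by
            simp [PySem.Dict.pop?, hgb]
          rw [hpop, hgetDa]
        rw [hstep]
        have hchain' : PvChain (pvAssoc Prod.fst Prod.snd (E ++ [(a, b)])) a ([a] ++ [b]) := by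
          refine pvChain_append _ a a b [a] [b] (by simp) rfl (by simp) rfl hfE'a ?_
          exact ⟨rfl, by simp, ⟨b, rfl, hfE'fresh b hba hbnfs⟩⟩
        refine pvInv_build E a b C _ a ([a] ++ [b]) none ha hb
          ⟨hinv.1, hinv.2.1, hinv.2.2⟩ ?_ ?_ ?_ ?_ ?_ ?_ ?_ hztail (Or.inr (Or.inr hgb))
        · exact PySem.Dict.nodup_keys_insert _ _ _ hinv.1
        · intro h
          rw [PySem.Dict.get?_insert]
          by_cases hK : h = a <;> simp [hK]
        · simp
        · intro _
          exact ⟨hchain', ⟨b, by simp, by simp⟩⟩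
        · intro hs
          exfalso
          simp only [List.map_append, List.mem_append] at hs
          rcases hs with hs | hs
          · exact hcase hs
          · simp at hs
            exact hba hs.symm
        · intro e he; cases he
        · intro _; rfl

theorem pvStitch_fold_aux (items : List (String × String))
    (hfs : (items.map Prod.fst).Nodup) (hss : (items.map Prod.snd).Nodup) :
    ∀ (rest E : List (String × String)) (C : PySem.Dict String (List String)),
      E ++ rest = items → PvInv E C → PvInv items (rest.foldl pvStitchStep C) := by
  intro rest
  induction rest with
  | nil =>
    intro E C heq hinv
    simp at heq
    subst heq
    exact hinv
  | cons ab rest' ih =>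
    intro E C heq hinv
    have heq' : (E ++ [ab]) ++ rest' = items := by simpa using heq
    have hpre : (E ++ [ab]) <+: items := ⟨rest', heq'⟩
    have hstep := pvStitch_step E ab C
      ((hpre.map Prod.fst).nodup hfs) ((hpre.map Prod.snd).nodup hss) hinv
    simpa using ih (E ++ [ab]) (pvStitchStep C ab) heq' hstep

theorem pvStitch_inv (items : List (String × String))
    (hfs : (items.map Prod.fst).Nodup) (hss : (items.map Prod.snd).Nodup) :
    PvInv items (items.foldl pvStitchStep PySem.Dict.empty) := by
  refine pvStitch_fold_aux items hfs hss items [] PySem.Dict.empty rfl ?_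
  refine ⟨by simp [PySem.Dict.keys_empty], ?_, ?_⟩
  · intro h L hget
    rw [PySem.Dict.get?_empty] at hget
    cases hget
  · intro h hmem
    simp at hmem

-- last-wins lookup of a foldl-insert dictionary, as a find? on the reversed pair list
theorem pv_get?_foldl (f g : String × String → String) :
    ∀ (l : List (String × String)) (d : PySem.Dict String String) (x : String),
      (l.foldl (fun d p => d.insert (f p) (g p)) d).get? x
        = match l.reverse.find? (fun p => f p == x) with
          | some p => some (g p)
          | none => d.get? x := by
  intro l
  induction l with
  | nil => intro d x; rfl
  | cons p t ih =>
    intro d x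
    simp only [List.foldl_cons, ih, List.reverse_cons, List.find?_append]
    cases hf : t.reverse.find? (fun p => f p == x) with
    | some q => simp
    | none =>
      simp only [Option.none_or]
      rw [PySem.Dict.get?_insert]
      by_cases hx : x = f p
      · simp [List.find?, hx]
      · have hbx : (f p == x) = false := beq_eq_false_iff_ne.mpr (fun h => hx h.symm)
        simp [List.find?, hbx, hx]

-- A's overwrite-fold selecting the LAST satisfying element is a find? on the reverse
theorem pv_foldl_last_eq_rev_find {α : Type} (p : α → Bool) (l : List α) (acc : α) :
    l.foldl (fun a x => if p x then x else a) acc = ((l.reverse.find? p).getD acc) := by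
  induction l generalizing acc with
  | nil => rfl
  | cons x t ih =>
    simp only [List.foldl_cons, List.reverse_cons, List.find?_append, ih]
    cases h : t.reverse.find? p with
    | some y => simp
    | none => cases hp : p x <;> simp [hp]

-- the two front tests agree: 'person in inverted_order_map' = 'person in followers'
theorem pv_tests_agree (orders : List (String × String)) (person : String) :
    (orders.foldl (fun d ps => d.insert ps.2 ps.1) (PySem.Dict.empty : PySem.Dict String String)).contains person
      = PySem.Set.contains (orders.foldl (fun s ps => PySem.Set.add s ps.2) PySem.Set.empty) person := by
  have hkeys : (orders.foldl (fun d ps => d.insert ps.2 ps.1) (PySem.Dict.empty : PySem.Dict String String)).keys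
      = PySem.Set.update (PySem.Dict.empty : PySem.Dict String String).keys (orders.map Prod.snd) :=
    PySem.Dict.keys_foldl_insert_key orders Prod.snd _ _
  have hset : (orders.foldl (fun s ps => PySem.Set.add s ps.2) PySem.Set.empty)
      = (orders.map Prod.snd).foldl PySem.Set.add PySem.Set.empty := by
    rw [List.foldl_map]
  rw [PySem.Dict.contains_eq_decide_mem_keys, hkeys, hset]
  simp [PySem.Set.update, PySem.Set.contains, PySem.Set.empty, PySem.Dict.keys_empty]

-- ---------- the main equivalence ----------

theorem pv_main (orders : List (String × String)) (hpre : Pre_get_order_using_dict orders) :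
    get_order_using_dict orders = get_order_using_dict_alt orders := by
  obtain ⟨heffN, hdisj⟩ := hpre
  set OM := orders.foldl (fun d p => d.insert p.1 p.2) (PySem.Dict.empty : PySem.Dict String String) with hOM
  set IM := orders.foldl (fun d p => d.insert p.2 p.1) (PySem.Dict.empty : PySem.Dict String String) with hIM
  have hOMkeysN : OM.keys.Nodup := by
    rw [hOM]
    exact PySem.Dict.nodup_keys_foldl_insert_key orders Prod.fst (fun _ p => p.2) PySem.Dict.empty
      (by rw [PySem.Dict.keys_empty]; exact List.nodup_nil)
  have hOMkeys_set : OM.keys = PySem.Set.ofList (orders.map Prod.fst) := by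
    rw [hOM, PySem.Dict.keys_foldl_insert_key orders Prod.fst (fun _ p => p.2) PySem.Dict.empty,
      PySem.Dict.keys_empty]
    rfl
  have hOMkeys_sub : ∀ k, k ∈ OM.keys ↔ k ∈ orders.map Prod.fst := by
    intro k
    rw [hOMkeys_set, PySem.Set.mem_ofList]
  have hkeys_items : OM.keys = OM.items.map Prod.fst := rfl
  have hitems_mem : ∀ k v, (k, v) ∈ OM.items → (k, v) ∈ orders := by
    intro k v hm
    have hg : OM.get? k = some v := PySem.Dict.get?_of_mem_items OM hm hOMkeysN
    rw [hOM, pv_get?_foldl Prod.fst Prod.snd orders PySem.Dict.empty k] at hg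
    cases hf : orders.reverse.find? (fun p => Prod.fst p == k) with
    | none => rw [hf] at hg; simp [PySem.Dict.get?_empty] at hg
    | some q =>
      rw [hf] at hg
      have hq : q ∈ orders := by simpa using List.mem_of_find?_eq_some hf
      have hqk : q.1 = k := by simpa using List.find?_some hf
      have hqv : q.2 = v := by injection hg
      have hqq : q = (k, v) := Prod.ext hqk hqv
      rw [← hqq]
      exact hq
  have hfsIN : (OM.items.map Prod.fst).Nodup := by rw [← hkeys_items]; exact hOMkeysN
  have hgetDfun : ∀ k, OM.getD k ""
      = ((orders.reverse.find? (fun p => p.1 == k)).map Prod.snd).getD "" := by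
    intro k
    rw [PySem.Dict.getD_eq_get?_getD, hOM, pv_get?_foldl Prod.fst Prod.snd orders PySem.Dict.empty k]
    cases hf : orders.reverse.find? (fun p => Prod.fst p == k) with
    | none => rfl
    | some q => rfl
  have hssIN : (OM.items.map Prod.snd).Nodup := by
    have hvals : OM.items.map Prod.snd = OM.keys.map (fun k => OM.getD k "") :=
      PySem.Dict.values_eq_map_keys OM hOMkeysN ""
    have hkeysdedup : OM.keys = PySem.List.dedup (orders.map Prod.fst) := by
      rw [hOMkeys_set, PySem.List.dedup_eq_ofList]
    have heq : OM.items.map Prod.snd = pvEffSeconds orders := by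
      rw [hvals, hkeysdedup]
      unfold pvEffSeconds
      congr 1
      funext k
      exact hgetDfun k
    rw [heq]
    exact heffN
  have hINV := pvStitch_inv OM.items hfsIN hssIN
  have hf_assoc : OM.get? = pvAssoc Prod.fst Prod.snd OM.items := rfl
  have hf_orders : ∀ x y, OM.get? x = some y → (x, y) ∈ orders := by
    intro x y h
    exact hitems_mem x y ((PySem.Dict.get?_eq_some_iff_mem_items OM x y hOMkeysN).mp h)
  have hIMc : ∀ p, IM.contains p = decide (p ∈ orders.map Prod.snd) := by
    intro p
    have hkeys : IM.keys = PySem.Set.ofList (orders.map Prod.snd) := by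
      rw [hIM, PySem.Dict.keys_foldl_insert_key orders Prod.snd (fun _ p => p.1) PySem.Dict.empty,
        PySem.Dict.keys_empty]
      rfl
    rw [PySem.Dict.contains_eq_decide_mem_keys]
    by_cases hp : p ∈ orders.map Prod.snd <;> simp [hkeys, PySem.Set.mem_ofList, hp]
  -- the two front folds compute the same value
  have hfolds : ∀ (keys : List String),
      keys.foldl (fun acc person => if !(IM.contains person) then person else acc) ""
        = keys.foldl (fun acc person =>
            if !(PySem.Set.contains (orders.foldl (fun s p => PySem.Set.add s p.2) PySem.Set.empty) person)
            then person else acc) "" := by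
    intro keys
    congr 1
    funext acc person
    rw [hIM, pv_tests_agree orders person]
  -- name the front
  set front := OM.keys.foldl (fun acc person => if !(IM.contains person) then person else acc) "" with hfront
  have hfront_find :
      front = ((OM.keys.reverse.find? (fun p => !(IM.contains p))).getD "") := by
    rw [hfront, pv_foldl_last_eq_rev_find]
  -- reduce both sides
  have hAside : get_order_using_dict orders
      = pvWalk OM.get? (orders.length + 1) front := by
    show pvWhileA OM (orders.length + 1) front [front] = _
    rw [pvWhileA_eq_walk]
    rw [show [front] = front :: ([] : List String) from rfl]
    conv_rhs => rw [pvWalk_head OM.get? (orders.length + 1) front]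
    simp
  have hBside : get_order_using_dict_alt orders
      = ((OM.items.foldl pvStitchStep PySem.Dict.empty).get? front).getD [front] := by
    show ((OM.items.foldl pvStitchStep PySem.Dict.empty).get?
        (OM.keys.foldl (fun acc person =>
          if !(PySem.Set.contains (orders.foldl (fun s p => PySem.Set.add s p.2) PySem.Set.empty) person)
          then person else acc) "")).getD
        [OM.keys.foldl (fun acc person =>
          if !(PySem.Set.contains (orders.foldl (fun s p => PySem.Set.add s p.2) PySem.Set.empty) person)
          then person else acc) ""] = _
    rw [← hfolds OM.keys, ← hfront]
  rw [hAside, hBside]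
  -- case on whether a front was found
  cases hr : OM.keys.reverse.find? (fun p => !(IM.contains p)) with
  | some s =>
    have hfr : front = s := by rw [hfront_find, hr]; rfl
    have hsk : s ∈ OM.keys := by
      have := List.mem_of_find?_eq_some hr
      simpa using this
    have hsns : s ∉ orders.map Prod.snd := by
      have hps := List.find?_some hr
      simp only [Bool.not_eq_true'] at hps
      rw [hIMc s] at hps
      simpa using hps
    have hinj : ∀ x y z, OM.get? x = some z → OM.get? y = some z → x = y := by
      intro x y z hx hy
      have h1 := (PySem.Dict.get?_eq_some_iff_mem_items OM x z hOMkeysN).mp hx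
      have h2 := (PySem.Dict.get?_eq_some_iff_mem_items OM y z hOMkeysN).mp hy
      have := List.inj_on_of_nodup_map hssIN h1 h2 rfl
      exact congrArg Prod.fst this
    have hnos : ∀ y, OM.get? y ≠ some s := by
      intro y hy
      exact hsns (List.mem_map.mpr ⟨(y, s), hf_orders y s hy, rfl⟩)
    have hrange : ∀ x y, OM.get? y = some x → x ∈ orders.map Prod.snd := by
      intro x y hy
      exact List.mem_map.mpr ⟨(y, x), hf_orders y x hy, rfl⟩
    have hproper := pvWalk_proper_of OM.get? s (orders.map Prod.snd) (orders.length + 1)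
      hrange hinj hnos (by simp)
    have hchainA := pvWalk_pvChain OM.get? (orders.length + 1) s hproper
    have hsfs : s ∈ OM.items.map Prod.fst := by rw [← hkeys_items]; exact hsk
    have hsns_items : s ∉ OM.items.map Prod.snd := by
      intro hmem
      rcases List.mem_map.mp hmem with ⟨p, hp, hpk⟩
      exact hsns (List.mem_map.mpr ⟨p, hitems_mem p.1 p.2 hp, hpk⟩)
    obtain ⟨L, hL⟩ := hINV.2.2 s hsfs hsns_items
    obtain ⟨hchainB, -⟩ := (hINV.2.1 s L hL).2.1 hsns_items
    have hLA : L = pvWalk OM.get? (orders.length + 1) s := by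
      apply pvChain_unique (OM.get?) L _ s _ hchainA
      rw [hf_assoc]
      exact hchainB
    rw [hfr, hL]
    rw [hLA]
    rfl
  | none =>
    have hfr : front = "" := by rw [hfront_find, hr]; rfl
    have hall : ∀ k, k ∈ orders.map Prod.fst → k ∈ orders.map Prod.snd := by
      intro k hk
      have hkk : k ∈ OM.keys.reverse := by
        rw [List.mem_reverse]
        exact (hOMkeys_sub k).mpr hk
      have := List.find?_eq_none.mp hr k hkk
      simp only [Bool.not_eq_true', Bool.not_eq_false] at this
      rw [hIMc k] at this
      simpa using this
    have hemp : "" ∉ orders.map Prod.fst := by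
      rcases hdisj with hd | ⟨p, hp, hpns⟩
      · exact hd
      · exact absurd (hall p hp) hpns
    have hfnone : OM.get? "" = none := by
      rw [PySem.Dict.get?_eq_none_iff_not_mem_keys]
      intro hmem
      exact hemp ((hOMkeys_sub "").mp hmem)
    have hchains_none : (OM.items.foldl pvStitchStep PySem.Dict.empty).get? "" = none := by
      cases hg : (OM.items.foldl pvStitchStep PySem.Dict.empty).get? "" with
      | none => rfl
      | some L =>
        exfalso
        have hmem := (hINV.2.1 "" L hg).1
        rw [← hkeys_items] at hmem
        exact hemp ((hOMkeys_sub "").mp hmem)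
    rw [hfr, hchains_none, pvWalk_of_none OM.get? (orders.length + 1) "" hfnone]
    rfl

-- ===== VERDICT (by name: the statement is the Claim_ definition above) =====
theorem get_order_using_dict_spec : Claim_equal_get_order_using_dict := by
  intro orders _ hpre
  unfold Spec_get_order_using_dict
  exact pv_main orders hpre
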